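-- pv_equiv track=rewrite | github.com/kazuhiko1979/edabit_2 | 137_very_hard_Spotlight_Map.py | spotlight_map
-- ===== SOURCE A (Python) =====
-- def spotlight_map(grid):
--   # Get the dimensions of the grid
--   rows = len(grid)
--   cols = len(grid[0])
--
--   # Initialize the result grid with zeros
--   result = [[0] * cols for _ in range(rows)]
--
--   # Iterate through each cell in the grid
--   for i in range(rows):
--     for j in range(cols):
--       # Calculate the spotlight sum for the current cell
--       spotlight_sum = 0
--       for x in range(i - 1, i + 2):
--         for y in range(j - 1, j + 2):
--           # Check boundary conditions
--           if 0 <= x < rows and 0 <= y < cols: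
--             spotlight_sum += grid[x][y]
--
--       # Update the result grid with the spotlight sum
--       result[i][j] = spotlight_sum
--
--   return result
-- ===== SOURCE B (Python) =====
-- def spotlight_map(grid):
--   # Separable two-pass version: vertical 3-sum pass, then horizontal 3-sum pass.
--   rows = len(grid)
--   cols = len(grid[0])
--   vert = [[grid[i][j]
--            + (grid[i - 1][j] if 0 < i else 0)
--            + (grid[i + 1][j] if i < rows - 1 else 0)
--            for j in range(cols)] for i in range(rows)]
--   return [[vert[i][j]
--            + (vert[i][j - 1] if 0 < j else 0)
--            + (vert[i][j + 1] if j < cols - 1 else 0)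
--            for j in range(cols)] for i in range(rows)]
-- ===== Notes on version B (the rewrite author's own statement) =====
-- stated objective: faster
-- what changed: Replaces the per-cell 3x3 bounded scan (9 guarded reads per cell) by two separable passes: a vertical 3-sum pass producing an intermediate grid, then a horizontal 3-sum pass over it (6 reads per cell, no per-read range() loop or 4-way bound test).
import Mathlib
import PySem

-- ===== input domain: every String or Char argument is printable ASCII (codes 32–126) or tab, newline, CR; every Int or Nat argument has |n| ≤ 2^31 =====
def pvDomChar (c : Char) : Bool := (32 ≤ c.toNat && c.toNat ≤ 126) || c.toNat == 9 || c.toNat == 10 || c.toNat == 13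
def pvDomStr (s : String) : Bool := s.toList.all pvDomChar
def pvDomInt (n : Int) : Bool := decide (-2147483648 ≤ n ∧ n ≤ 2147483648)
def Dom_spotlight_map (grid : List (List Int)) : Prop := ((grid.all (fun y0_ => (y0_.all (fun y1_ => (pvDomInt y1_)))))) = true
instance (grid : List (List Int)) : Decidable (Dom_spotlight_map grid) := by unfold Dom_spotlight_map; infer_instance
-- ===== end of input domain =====

-- B replaces the per-cell 3x3 bounded scan by two separable passes (vertical 3-sum, then horizontal 3-sum); equivalence of the return values is proved below.

-- ===== PORT A =====
def spotlight_map (grid : List (List Int)) : List (List Int) :=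
  let rows : Int := grid.length
  let cols : Int := (PySem.List.pyGetD grid 0 []).length
  (PySem.List.pyRange 0 rows 1).map (fun i =>
    (PySem.List.pyRange 0 cols 1).map (fun j =>
      (PySem.List.pyRange (i - 1) (i + 2) 1).foldl (fun s x =>
        (PySem.List.pyRange (j - 1) (j + 2) 1).foldl (fun s y =>
          if 0 ≤ x ∧ x < rows ∧ 0 ≤ y ∧ y < cols then
            s + PySem.List.pyGetD (PySem.List.pyGetD grid x []) y 0
          else s) s) 0))

-- ===== PORT B =====
def spotlight_map_alt (grid : List (List Int)) : List (List Int) :=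
  let rows : Int := grid.length
  let cols : Int := (PySem.List.pyGetD grid 0 []).length
  let vert := (PySem.List.pyRange 0 rows 1).map (fun i =>
    (PySem.List.pyRange 0 cols 1).map (fun j =>
      PySem.List.pyGetD (PySem.List.pyGetD grid i []) j 0
      + (if 0 < i then PySem.List.pyGetD (PySem.List.pyGetD grid (i - 1) []) j 0 else 0)
      + (if i < rows - 1 then PySem.List.pyGetD (PySem.List.pyGetD grid (i + 1) []) j 0 else 0)))
  (PySem.List.pyRange 0 rows 1).map (fun i =>
    (PySem.List.pyRange 0 cols 1).map (fun j =>
      PySem.List.pyGetD (PySem.List.pyGetD vert i []) j 0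
      + (if 0 < j then PySem.List.pyGetD (PySem.List.pyGetD vert i []) (j - 1) 0 else 0)
      + (if j < cols - 1 then PySem.List.pyGetD (PySem.List.pyGetD vert i []) (j + 1) 0 else 0)))

-- ===== PRECONDITION & SPEC =====
-- Pre_ excludes exactly the inputs where A raises IndexError: the empty grid (grid[0]),
-- and grids with a row shorter than the first row (grid[x][y] for y < len(grid[0])).
def Pre_spotlight_map (grid : List (List Int)) : Prop :=
  grid ≠ [] ∧ ∀ row ∈ grid, (grid.headD []).length ≤ row.length
instance (grid : List (List Int)) : Decidable (Pre_spotlight_map grid) := by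
  unfold Pre_spotlight_map; infer_instance
def pvWitness_spotlight_map : List (List Int) := [[1, 2], [3, 4]]

def Spec_spotlight_map (grid : List (List Int)) (out : List (List Int)) : Prop := out = spotlight_map_alt grid
instance (grid : List (List Int)) (out : List (List Int)) : Decidable (Spec_spotlight_map grid out) := by unfold Spec_spotlight_map; infer_instance

-- ===== CLAIM (what is proved, stated in full; the proofs are below) =====
def Claim_equal_spotlight_map : Prop := ∀ (grid : List (List Int)), Dom_spotlight_map grid → Pre_spotlight_map grid → Spec_spotlight_map grid (spotlight_map grid)

-- ===== LEMMAS AND PROOFS =====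

theorem pyRange3 (a : Int) : PySem.List.pyRange a (a + 3) 1 = [a, a + 1, a + 2] := by
  rw [PySem.List.pyRange_one_cons (by omega), PySem.List.pyRange_one_cons (by omega),
      PySem.List.pyRange_one_cons (by omega), PySem.List.pyRange_one_eq_nil (by omega)]
  norm_num
  ring

theorem pyRange3' (a : Int) : PySem.List.pyRange (a - 1) (a + 2) 1 = [a - 1, a, a + 1] := by
  rw [show a + 2 = (a - 1) + 3 by ring, pyRange3,
      show a - 1 + 1 = a by ring, show a - 1 + 2 = a + 1 by ring]

-- ===== VERDICT (by name: the statement is the Claim_ definition above) =====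
theorem spotlight_map_spec : Claim_equal_spotlight_map := by
  intro grid _ hpre
  unfold Spec_spotlight_map spotlight_map spotlight_map_alt
  apply List.map_congr_left
  intro i hi
  rw [PySem.List.mem_pyRange_one] at hi
  apply List.map_congr_left
  intro j hj
  rw [PySem.List.mem_pyRange_one] at hj
  obtain ⟨hi0, hi1⟩ := hi
  obtain ⟨hj0, hj1⟩ := hj
  rw [PySem.List.pyGetD_map_pyRange_of_nonneg _ _ _ _ hi0 hi1]
  rw [pyRange3' i, pyRange3' j]
  simp only [List.foldl]
  -- rewrite the horizontal-pass lookups into the vertical-pass values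
  rw [PySem.List.pyGetD_map_pyRange_of_nonneg _ _ j _ hj0 hj1]
  by_cases h3 : 0 < j
  all_goals by_cases h4 : j < ((PySem.List.pyGetD grid 0 []).length : Int) - 1
  all_goals first
    | rw [if_pos h3, if_pos h4,
          PySem.List.pyGetD_map_pyRange_of_nonneg _ _ (j-1) _ (by omega) (by omega),
          PySem.List.pyGetD_map_pyRange_of_nonneg _ _ (j+1) _ (by omega) (by omega)]
    | rw [if_pos h3, if_neg h4,
          PySem.List.pyGetD_map_pyRange_of_nonneg _ _ (j-1) _ (by omega) (by omega)]
    | rw [if_neg h3, if_pos h4,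
          PySem.List.pyGetD_map_pyRange_of_nonneg _ _ (j+1) _ (by omega) (by omega)]
    | rw [if_neg h3, if_neg h4]
  -- abbreviate the nine neighbourhood reads and the two dimensions
  all_goals
    set R : Int := (grid.length : Int) with hR
  all_goals
    set C : Int := ((PySem.List.pyGetD grid 0 []).length : Int) with hC
  all_goals
    set amm := PySem.List.pyGetD (PySem.List.pyGetD grid (i-1) []) (j-1) 0 with hamm
  all_goals
    set am0 := PySem.List.pyGetD (PySem.List.pyGetD grid (i-1) []) j 0 with ham0
  all_goals
    set amp := PySem.List.pyGetD (PySem.List.pyGetD grid (i-1) []) (j+1) 0 with hamp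
  all_goals
    set a0m := PySem.List.pyGetD (PySem.List.pyGetD grid i []) (j-1) 0 with ha0m
  all_goals
    set a00 := PySem.List.pyGetD (PySem.List.pyGetD grid i []) j 0 with ha00
  all_goals
    set a0p := PySem.List.pyGetD (PySem.List.pyGetD grid i []) (j+1) 0 with ha0p
  all_goals
    set apm := PySem.List.pyGetD (PySem.List.pyGetD grid (i+1) []) (j-1) 0 with hapm
  all_goals
    set ap0 := PySem.List.pyGetD (PySem.List.pyGetD grid (i+1) []) j 0 with hap0
  all_goals
    set app := PySem.List.pyGetD (PySem.List.pyGetD grid (i+1) []) (j+1) 0 with happ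
  -- normalise the 3x3 boundary guards of A to the four atomic boundary conditions
  all_goals
    have c_mm : (0 ≤ i - 1 ∧ i - 1 < R ∧ 0 ≤ j - 1 ∧ j - 1 < C) ↔ (0 < i ∧ 0 < j) := by omega
  all_goals
    have c_m0 : (0 ≤ i - 1 ∧ i - 1 < R ∧ 0 ≤ j ∧ j < C) ↔ (0 < i) := by omega
  all_goals
    have c_mp : (0 ≤ i - 1 ∧ i - 1 < R ∧ 0 ≤ j + 1 ∧ j + 1 < C) ↔ (0 < i ∧ j < C - 1) := by omega
  all_goals
    have c_0m : (0 ≤ i ∧ i < R ∧ 0 ≤ j - 1 ∧ j - 1 < C) ↔ (0 < j) := by omega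
  all_goals
    have c_00 : (0 ≤ i ∧ i < R ∧ 0 ≤ j ∧ j < C) ↔ True := by simp; omega
  all_goals
    have c_0p : (0 ≤ i ∧ i < R ∧ 0 ≤ j + 1 ∧ j + 1 < C) ↔ (j < C - 1) := by omega
  all_goals
    have c_pm : (0 ≤ i + 1 ∧ i + 1 < R ∧ 0 ≤ j - 1 ∧ j - 1 < C) ↔ (i < R - 1 ∧ 0 < j) := by omega
  all_goals
    have c_p0 : (0 ≤ i + 1 ∧ i + 1 < R ∧ 0 ≤ j ∧ j < C) ↔ (i < R - 1) := by omega
  all_goals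
    have c_pp : (0 ≤ i + 1 ∧ i + 1 < R ∧ 0 ≤ j + 1 ∧ j + 1 < C) ↔ (i < R - 1 ∧ j < C - 1) := by omega
  all_goals simp only [c_mm, c_m0, c_mp, c_0m, c_00, c_0p, c_pm, c_p0, c_pp, if_true]
  all_goals by_cases h1 : 0 < i
  all_goals by_cases h2 : i < R - 1
  all_goals simp only [h1, h2, h3, h4, and_self, if_pos, if_neg, and_true,
    and_false, not_false_eq_true]
  all_goals simp [h1, h2, h3, h4]
  all_goals ring
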